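-- pv_equiv track=rewrite | github.com/riteshakumar/text2ql | src/text2ql/evaluate.py | _slice_clause
-- ===== SOURCE A (Python) =====
-- def _slice_clause(query: str, start_keyword: str, end_keywords: tuple[str, ...]) -> str:
--     lowered = query.lower()
--     start_marker = f"{start_keyword.lower()} "
--     start = lowered.find(start_marker)
--     if start < 0:
--         return ""
--     body_start = start + len(start_marker)
--     body = query[body_start:]
--     lowered_body = lowered[body_start:]
--     end = len(body)
--     for marker in end_keywords:
--         idx = lowered_body.find(f" {marker}")
--         if idx >= 0:
--             end = min(end, idx)
--     semicolon_index = lowered_body.find(";")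
--     if semicolon_index >= 0:
--         end = min(end, semicolon_index)
--     return body[:end].strip()
-- ===== SOURCE B (Python) =====
-- def _slice_clause(query: str, start_keyword: str, end_keywords: tuple[str, ...]) -> str:
--     lowered = query.lower()
--     start_marker = start_keyword.lower() + " "
--     start = lowered.find(start_marker)
--     if start < 0:
--         return ""
--     body = query[start + len(start_marker):]
--     lowered_body = lowered[start + len(start_marker):]
--     cut = len(lowered_body)
--     for i, ch in enumerate(lowered_body):
--         if ch == ";" or (ch == " " and any(lowered_body.startswith(m, i + 1) for m in end_keywords)):
--             cut = i
--             break
--     return body[:cut].strip()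
-- ===== Notes on version B (the rewrite author's own statement) =====
-- stated objective: alternative
-- what changed: Replaced the per-end-keyword str.find scans combined by min with a single left-to-right scan of the body that stops at the first position starting ';' or ' '+some end keyword (leftmost match of any marker).
import Mathlib
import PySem

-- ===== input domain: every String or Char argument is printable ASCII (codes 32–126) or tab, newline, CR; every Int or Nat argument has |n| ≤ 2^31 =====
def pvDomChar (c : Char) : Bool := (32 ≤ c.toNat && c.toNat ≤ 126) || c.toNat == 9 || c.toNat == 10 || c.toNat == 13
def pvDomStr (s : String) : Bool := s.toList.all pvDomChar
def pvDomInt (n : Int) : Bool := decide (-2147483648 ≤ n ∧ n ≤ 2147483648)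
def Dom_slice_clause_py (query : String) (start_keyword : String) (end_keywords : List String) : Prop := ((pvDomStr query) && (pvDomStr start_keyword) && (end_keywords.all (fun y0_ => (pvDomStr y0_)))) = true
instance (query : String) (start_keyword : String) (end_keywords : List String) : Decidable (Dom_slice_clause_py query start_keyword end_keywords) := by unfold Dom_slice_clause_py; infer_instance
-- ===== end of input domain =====

-- B replaces A's per-end-keyword find+min passes by one left-to-right scan that stops at
-- the first position starting ';' or ' '+some end keyword (objective: alternative, same cost).

-- ===== PORT A =====
def slice_clause_py (query : String) (start_keyword : String) (end_keywords : List String) : String :=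
  let lowered := PySem.Chars.lower query.toList
  let start_marker := PySem.Chars.lower start_keyword.toList ++ [' ']
  let start := PySem.Chars.find lowered start_marker
  if start < 0 then ""
  else
    let body_start := start + (start_marker.length : Int)
    let body := PySem.List.slice query.toList (some body_start) none
    let lowered_body := PySem.List.slice lowered (some body_start) none
    let endv : Int := end_keywords.foldl (fun e marker =>
        let idx := PySem.Chars.find lowered_body (' ' :: marker.toList)
        if 0 ≤ idx then min e idx else e) ((body.length : Int))
    let semicolon_index := PySem.Chars.find lowered_body [';']
    let endv := if 0 ≤ semicolon_index then min endv semicolon_index else endv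
    String.ofList (PySem.Chars.strip (PySem.List.slice body none (some endv)))

-- ===== PORT B =====
-- the for-loop with break of Source B, as structural recursion over the body's suffixes
def pvScanB (end_keywords : List String) : List Char → Nat
  | [] => 0
  | c :: rest =>
    if c == ';' || (c == ' ' && end_keywords.any (fun m => PySem.Chars.startswith rest m.toList))
    then 0 else pvScanB end_keywords rest + 1

def slice_clause_py_alt (query : String) (start_keyword : String) (end_keywords : List String) : String :=
  let lowered := PySem.Chars.lower query.toList
  let start_marker := PySem.Chars.lower start_keyword.toList ++ [' ']
  let start := PySem.Chars.find lowered start_marker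
  if start < 0 then ""
  else
    let body := PySem.List.slice query.toList (some (start + (start_marker.length : Int))) none
    let lowered_body := PySem.List.slice lowered (some (start + (start_marker.length : Int))) none
    let cut := pvScanB end_keywords lowered_body
    -- body[:cut] with 0 ≤ cut is List.take cut
    String.ofList (PySem.Chars.strip (body.take cut))

-- ===== PRECONDITION & SPEC =====
def Spec_slice_clause_py (query : String) (start_keyword : String) (end_keywords : List String) (out : String) : Prop := out = slice_clause_py_alt query start_keyword end_keywords
instance (query : String) (start_keyword : String) (end_keywords : List String) (out : String) : Decidable (Spec_slice_clause_py query start_keyword end_keywords out) := by unfold Spec_slice_clause_py; infer_instance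

-- ===== CLAIM (what is proved, stated in full; the proofs are below) =====
def Claim_equal_slice_clause_py : Prop := ∀ (query : String) (start_keyword : String) (end_keywords : List String), Dom_slice_clause_py query start_keyword end_keywords → Spec_slice_clause_py query start_keyword end_keywords (slice_clause_py query start_keyword end_keywords)

-- ===== LEMMAS AND PROOFS =====

-- "some marker pattern starts at position j of lb"
def pvMatchAt (ends : List String) (lb : List Char) (j : Nat) : Prop :=
  [';'] <+: lb.drop j ∨ ∃ m ∈ ends, (' ' :: m.toList) <+: lb.drop j

lemma pvScanB_le (ends : List String) (lb : List Char) : pvScanB ends lb ≤ lb.length := by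
  induction lb with
  | nil => simp [pvScanB]
  | cons c rest ih => simp only [pvScanB, List.length_cons]; split <;> omega

lemma pvScanB_cons (ends : List String) (c : Char) (rest : List Char) :
    pvScanB ends (c :: rest) =
      if (c == ';' || (c == ' ' && ends.any (fun m => PySem.Chars.startswith rest m.toList)))
      then 0 else pvScanB ends rest + 1 := rfl

lemma pvCond_iff (ends : List String) (c : Char) (rest : List Char) :
    (c == ';' || (c == ' ' && ends.any (fun m => PySem.Chars.startswith rest m.toList))) = true
      ↔ pvMatchAt ends (c :: rest) 0 := by
  unfold pvMatchAt
  simp only [List.drop_zero, Bool.or_eq_true, Bool.and_eq_true, beq_iff_eq, List.any_eq_true,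
    PySem.Chars.startswith_iff, List.cons_prefix_cons, List.nil_prefix, and_true]
  constructor
  · rintro (h | ⟨hc, m, hm, hp⟩)
    · exact Or.inl h.symm
    · exact Or.inr ⟨m, hm, hc.symm, hp⟩
  · rintro (h | ⟨m, hm, hc, hp⟩)
    · exact Or.inl h.symm
    · exact Or.inr ⟨hc.symm, m, hm, hp⟩

lemma pvMatchAt_cons_succ (ends : List String) (c : Char) (rest : List Char) (j : Nat) :
    pvMatchAt ends (c :: rest) (j + 1) ↔ pvMatchAt ends rest j := by
  simp [pvMatchAt]

lemma pvScanB_not_match (ends : List String) (lb : List Char) (j : Nat)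
    (hj : j < pvScanB ends lb) : ¬ pvMatchAt ends lb j := by
  induction lb generalizing j with
  | nil => simp [pvScanB] at hj
  | cons c rest ih =>
    by_cases hc : (c == ';' || (c == ' ' && ends.any (fun m => PySem.Chars.startswith rest m.toList))) = true
    · rw [pvScanB_cons, if_pos hc] at hj
      omega
    · rw [pvScanB_cons, if_neg hc] at hj
      cases j with
      | zero => rw [← pvCond_iff ends c rest]; simpa using hc
      | succ j =>
        rw [pvMatchAt_cons_succ]
        exact ih j (by omega)

lemma pvScanB_match (ends : List String) (lb : List Char)
    (h : pvScanB ends lb < lb.length) : pvMatchAt ends lb (pvScanB ends lb) := by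
  induction lb with
  | nil => simp [pvScanB] at h
  | cons c rest ih =>
    by_cases hc : (c == ';' || (c == ' ' && ends.any (fun m => PySem.Chars.startswith rest m.toList))) = true
    · rw [pvScanB_cons, if_pos hc]
      exact (pvCond_iff ends c rest).1 hc
    · rw [pvScanB_cons, if_neg hc] at h ⊢
      rw [pvMatchAt_cons_succ]
      exact ih (by simpa using h)

lemma pvMatch_of_prefix (lb sub : List Char) (j : Nat) (h : sub <+: lb.drop j) :
    0 ≤ PySem.Chars.find lb sub ∧ (PySem.Chars.find lb sub).toNat ≤ j := by
  have hnn : 0 ≤ PySem.Chars.find lb sub := by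
    rw [PySem.Chars.find_nonneg_iff]
    rw [← PySem.Chars.isIn_iff_infix, ← PySem.Chars.exists_prefix_drop_iff_isIn]
    exact ⟨j, h⟩
  refine ⟨hnn, ?_⟩
  by_contra hlt
  exact (PySem.Chars.find_spec (s := lb) (sub := sub) hnn).2 j (by omega) h

lemma pvFind_matchAt (ends : List String) (lb sub : List Char)
    (hsub : sub = [';'] ∨ ∃ m ∈ ends, sub = ' ' :: m.toList)
    (hnn : 0 ≤ PySem.Chars.find lb sub) :
    pvMatchAt ends lb (PySem.Chars.find lb sub).toNat := by
  have hpre := (PySem.Chars.find_spec (s := lb) (sub := sub) hnn).1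
  rcases hsub with h | ⟨m, hm, h⟩
  · exact Or.inl (h ▸ hpre)
  · exact Or.inr ⟨m, hm, h ▸ hpre⟩

-- characterisation of A's foldl of find-and-min
lemma pvFold_spec (ends : List String) (lb : List Char) (e : Int) :
    (ends.foldl (fun e marker =>
        let idx := PySem.Chars.find lb (' ' :: marker.toList)
        if 0 ≤ idx then min e idx else e) e = e ∨
      ∃ m ∈ ends, ends.foldl (fun e marker =>
        let idx := PySem.Chars.find lb (' ' :: marker.toList)
        if 0 ≤ idx then min e idx else e) e = PySem.Chars.find lb (' ' :: m.toList) ∧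
        0 ≤ PySem.Chars.find lb (' ' :: m.toList)) ∧
    ends.foldl (fun e marker =>
        let idx := PySem.Chars.find lb (' ' :: marker.toList)
        if 0 ≤ idx then min e idx else e) e ≤ e ∧
    ∀ m ∈ ends, 0 ≤ PySem.Chars.find lb (' ' :: m.toList) →
      ends.foldl (fun e marker =>
        let idx := PySem.Chars.find lb (' ' :: marker.toList)
        if 0 ≤ idx then min e idx else e) e ≤ PySem.Chars.find lb (' ' :: m.toList) := by
  induction ends generalizing e with
  | nil => simp
  | cons m ms ih =>
    simp only [List.foldl_cons, List.mem_cons]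
    obtain ⟨ihmem, ihle, ihall⟩ := ih (if 0 ≤ PySem.Chars.find lb (' ' :: m.toList)
      then min e (PySem.Chars.find lb (' ' :: m.toList)) else e)
    refine ⟨?_, ?_, ?_⟩
    · rcases ihmem with hh | ⟨m', hm', hh⟩
      · rw [hh]
        split
        · rename_i h0
          rcases min_cases e (PySem.Chars.find lb (' ' :: m.toList)) with ⟨h1, _⟩ | ⟨h1, _⟩
          · exact Or.inl h1
          · exact Or.inr ⟨m, Or.inl rfl, h1, h0⟩
        · exact Or.inl rfl
      · exact Or.inr ⟨m', Or.inr hm', hh⟩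
    · refine le_trans ihle ?_
      split <;> simp
    · rintro m' (rfl | hm') h0
      · refine le_trans ihle ?_
        simp [h0]
      · exact ihall m' hm' h0

-- A's end value equals B's scan cut, on any list
lemma pvEnd_eq (ends : List String) (lb : List Char) :
    (if 0 ≤ PySem.Chars.find lb [';']
      then min (ends.foldl (fun e marker =>
          let idx := PySem.Chars.find lb (' ' :: marker.toList)
          if 0 ≤ idx then min e idx else e) ((lb.length : Int))) (PySem.Chars.find lb [';'])
      else ends.foldl (fun e marker =>
          let idx := PySem.Chars.find lb (' ' :: marker.toList)
          if 0 ≤ idx then min e idx else e) ((lb.length : Int))) = (pvScanB ends lb : Int) := by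
  set N := pvScanB ends lb with hN
  obtain ⟨hmem, hle, hall⟩ := pvFold_spec ends lb ((lb.length : Int))
  set F := ends.foldl (fun e marker =>
      let idx := PySem.Chars.find lb (' ' :: marker.toList)
      if 0 ≤ idx then min e idx else e) ((lb.length : Int)) with hF
  -- upper bound: the A-value is ≤ N
  have hub : (if 0 ≤ PySem.Chars.find lb [';'] then min F (PySem.Chars.find lb [';']) else F) ≤ (N : Int) := by
    rcases Nat.lt_or_ge N lb.length with hlt | hge
    · rcases pvScanB_match ends lb hlt with hsemi | ⟨m, hm, hpre⟩
      · obtain ⟨h0, hle2⟩ := pvMatch_of_prefix lb [';'] N hsemi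
        have : PySem.Chars.find lb [';'] ≤ (N : Int) := by omega
        rw [if_pos h0]
        exact le_trans (min_le_right _ _) this
      · obtain ⟨h0, hle2⟩ := pvMatch_of_prefix lb (' ' :: m.toList) N hpre
        have h3 : F ≤ PySem.Chars.find lb (' ' :: m.toList) := hall m hm h0
        have : F ≤ (N : Int) := by omega
        split
        · exact le_trans (min_le_left _ _) this
        · exact this
    · have hN' : N = lb.length := le_antisymm (pvScanB_le ends lb) hge
      have hFle : F ≤ (N : Int) := by rw [hN']; exact hle
      split
      · exact le_trans (min_le_left _ _) hFle
      · exact hFle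
  -- lower bound
  have hlb : (N : Int) ≤ (if 0 ≤ PySem.Chars.find lb [';'] then min F (PySem.Chars.find lb [';']) else F) := by
    have hN_le_match : ∀ sub : List Char, (sub = [';'] ∨ ∃ m ∈ ends, sub = ' ' :: m.toList) →
        0 ≤ PySem.Chars.find lb sub → (N : Int) ≤ PySem.Chars.find lb sub := by
      intro sub hsub h0
      have hmatch := pvFind_matchAt ends lb sub hsub h0
      by_contra hlt
      exact pvScanB_not_match ends lb (PySem.Chars.find lb sub).toNat (by omega) hmatch
    have hNF : (N : Int) ≤ F := by
      rcases hmem with hh | ⟨m, hm, hh, h0⟩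
      · rw [hh]
        exact_mod_cast pvScanB_le ends lb
      · rw [hh]
        exact hN_le_match _ (Or.inr ⟨m, hm, rfl⟩) h0
    split
    · rename_i h0
      exact le_min hNF (hN_le_match [';'] (Or.inl rfl) h0)
    · exact hNF
  omega

lemma pvLower_length (q : List Char) : (PySem.Chars.lower q).length = q.length := by
  simp [PySem.Chars.lower]

-- ===== VERDICT (by name: the statement is the Claim_ definition above) =====
theorem slice_clause_py_spec : Claim_equal_slice_clause_py := by
  intro query start_keyword end_keywords _
  unfold Spec_slice_clause_py slice_clause_py slice_clause_py_alt
  simp only []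
  set lowered := PySem.Chars.lower query.toList with hlow
  set start_marker := PySem.Chars.lower start_keyword.toList ++ [' '] with hsm
  set start := PySem.Chars.find lowered start_marker with hstart
  split
  · rfl
  · rename_i hpos
    have h0 : 0 ≤ start + (start_marker.length : Int) := by
      have := PySem.Chars.neg_one_le_find lowered start_marker
      rw [← hstart] at this
      have : -1 ≤ start := this
      have hml : 1 ≤ start_marker.length := by simp [hsm]
      omega
    set body := PySem.List.slice query.toList (some (start + (start_marker.length : Int))) none with hbody
    set lb := PySem.List.slice lowered (some (start + (start_marker.length : Int))) none with hlb
    have hlen : body.length = lb.length := by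
      rw [hbody, hlb, PySem.List.slice_from _ h0, PySem.List.slice_from _ h0]
      simp [hlow, pvLower_length]
    rw [hlen]
    have hend := pvEnd_eq end_keywords lb
    set endv := (if 0 ≤ PySem.Chars.find lb [';']
      then min (end_keywords.foldl (fun e marker =>
          let idx := PySem.Chars.find lb (' ' :: marker.toList)
          if 0 ≤ idx then min e idx else e) ((lb.length : Int))) (PySem.Chars.find lb [';'])
      else end_keywords.foldl (fun e marker =>
          let idx := PySem.Chars.find lb (' ' :: marker.toList)
          if 0 ≤ idx then min e idx else e) ((lb.length : Int))) with hendv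
    rw [hend]
    rw [PySem.List.slice_to _ (Int.natCast_nonneg _)]
    simp
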